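-- pv_equiv track=rewrite | github.com/TheAlgorithms/Python | conversions/decimal_to_quartenary.py | decimal_to_quartenary
-- ===== SOURCE A (Python) =====
-- def decimal_to_quartenary(num):
--     '''
--     Convert a decimal number to it's quartenary equivalent (without any external libraries).
--
--     >>> decimal_to_quartenary(10)
--     '22'
--     >>> decimal_to_quartenary(5)
--     '11'
--     >>> decimal_to_quartenary(1000)
--     '33220'
--     '''
--
--     if not(str(num).isnumeric()):
--         raise TypeError("The number entered has to be a decimal number.")
--
--     quartenary = ''
--     while num != 0:
--         quartenary += str(num % 4)
--         num //= 4
--     return quartenary[::-1]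
-- ===== SOURCE B (Python) =====
-- def decimal_to_quartenary(num):
--     if not(str(num).isnumeric()):
--         raise TypeError("The number entered has to be a decimal number.")
--     if num == 0:
--         return ''
--     return decimal_to_quartenary(num // 4) + str(num % 4)
-- ===== Notes on version B (the rewrite author's own statement) =====
-- stated objective: alternative
-- what changed: Replaced the iterative digit-accumulation loop followed by a string reversal with a recursion that builds the most-significant digit first, eliminating the [::-1] reversal.
import Mathlib
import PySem

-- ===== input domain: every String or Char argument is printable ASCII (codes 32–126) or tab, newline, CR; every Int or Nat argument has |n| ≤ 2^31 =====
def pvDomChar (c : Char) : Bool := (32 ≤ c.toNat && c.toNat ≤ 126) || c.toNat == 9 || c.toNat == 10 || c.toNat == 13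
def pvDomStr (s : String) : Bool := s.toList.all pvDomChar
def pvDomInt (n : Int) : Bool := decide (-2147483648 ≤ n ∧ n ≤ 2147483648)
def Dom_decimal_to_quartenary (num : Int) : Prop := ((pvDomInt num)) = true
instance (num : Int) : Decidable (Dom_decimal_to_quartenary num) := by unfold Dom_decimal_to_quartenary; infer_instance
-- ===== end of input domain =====

-- B replaces A's digit loop + [::-1] reversal by a recursion building the most-significant digit first; same cost (objective: alternative).


-- termination helper for both ports: num // 4 shrinks for positive num
theorem pvQuartDiv_lt (num : Int) (h : 0 < num) :
    (PySem.Int.floordiv num 4).toNat < num.toNat := by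
  rw [PySem.Int.floordiv_eq_ediv_of_pos (by norm_num)]
  omega

-- ===== PORT A =====
-- the while loop: quartenary += str(num % 4); num //= 4
-- (negatives are a totality guard only: there A raises TypeError before the loop, outside Pre_)
def pvALoop (num : Int) (acc : List Char) : List Char :=
  if _h : 0 < num then
    pvALoop (PySem.Int.floordiv num 4) (acc ++ (PySem.Int.toStr (PySem.Int.mod num 4)).toList)
  else acc
termination_by num.toNat
decreasing_by exact pvQuartDiv_lt num _h

def decimal_to_quartenary (num : Int) : String :=
  -- return quartenary[::-1]  (full reverse of the accumulated string)
  String.ofList (pvALoop num []).reverse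

-- ===== PORT B =====
-- (num < 0 is a totality guard only: there B raises TypeError before recursing, outside Pre_)
def decimal_to_quartenary_alt (num : Int) : String :=
  if _h : 0 < num then
    decimal_to_quartenary_alt (PySem.Int.floordiv num 4) ++ PySem.Int.toStr (PySem.Int.mod num 4)
  else ""
termination_by num.toNat
decreasing_by exact pvQuartDiv_lt num _h

-- ===== PRECONDITION & SPEC =====
-- Pre_: str(num).isnumeric() is False for every negative int, so A (and B) raise TypeError there.
def Pre_decimal_to_quartenary (num : Int) : Prop := 0 ≤ num
instance (num : Int) : Decidable (Pre_decimal_to_quartenary num) := by unfold Pre_decimal_to_quartenary; infer_instance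
def pvWitness_decimal_to_quartenary : Int := (10)

def Spec_decimal_to_quartenary (num : Int) (out : String) : Prop := out = decimal_to_quartenary_alt num
instance (num : Int) (out : String) : Decidable (Spec_decimal_to_quartenary num out) := by unfold Spec_decimal_to_quartenary; infer_instance

-- ===== CLAIM (what is proved, stated in full; the proofs are below) =====
def Claim_equal_decimal_to_quartenary : Prop := ∀ (num : Int), Dom_decimal_to_quartenary num → Pre_decimal_to_quartenary num → Spec_decimal_to_quartenary num (decimal_to_quartenary num)

-- ===== LEMMAS AND PROOFS =====

-- the loop accumulator distributes over ++
theorem pvALoop_acc (num : Int) (acc : List Char) :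
    pvALoop num acc = acc ++ pvALoop num [] := by
  induction hn : num.toNat using Nat.strong_induction_on generalizing num acc with
  | _ n ih =>
    by_cases h : 0 < num
    · have ihq := fun ac => ih _ (hn ▸ pvQuartDiv_lt num h) (PySem.Int.floordiv num 4) ac rfl
      rw [pvALoop, dif_pos h]
      conv_rhs => rw [pvALoop, dif_pos h]
      rw [ihq (acc ++ (PySem.Int.toStr (PySem.Int.mod num 4)).toList),
        ihq ([] ++ (PySem.Int.toStr (PySem.Int.mod num 4)).toList)]
      simp
    · conv_rhs => rw [pvALoop, dif_neg h]
      rw [pvALoop, dif_neg h]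
      simp

theorem pvDigit_single (num : Int) (_h : 0 < num) :
    ∃ c : Char, (PySem.Int.toStr (PySem.Int.mod num 4)).toList = [c] := by
  have h4 : PySem.Int.mod num 4 = num % 4 := PySem.Int.mod_eq_emod_of_pos (by norm_num)
  have hb : 0 ≤ num % 4 ∧ num % 4 < 4 := ⟨Int.emod_nonneg _ (by norm_num), Int.emod_lt_of_pos _ (by norm_num)⟩
  have : num % 4 = 0 ∨ num % 4 = 1 ∨ num % 4 = 2 ∨ num % 4 = 3 := by omega
  rcases this with h0 | h0 | h0 | h0
  · exact ⟨'0', by rw [h4, h0]; decide⟩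
  · exact ⟨'1', by rw [h4, h0]; decide⟩
  · exact ⟨'2', by rw [h4, h0]; decide⟩
  · exact ⟨'3', by rw [h4, h0]; decide⟩

theorem pvMain (num : Int) (h : 0 ≤ num) :
    String.ofList (pvALoop num []).reverse = decimal_to_quartenary_alt num := by
  induction hn : num.toNat using Nat.strong_induction_on generalizing num with
  | _ n ih =>
    by_cases hp : 0 < num
    · have hq : 0 ≤ PySem.Int.floordiv num 4 := by
        rw [PySem.Int.floordiv_eq_ediv_of_pos (by norm_num)]
        exact Int.ediv_nonneg h (by norm_num)
      obtain ⟨c, hc⟩ := pvDigit_single num hp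
      rw [pvALoop, dif_pos hp, pvALoop_acc, List.nil_append, hc,
        List.reverse_append, List.reverse_singleton,
        decimal_to_quartenary_alt, dif_pos hp,
        ← ih _ (hn ▸ pvQuartDiv_lt num hp) _ hq rfl,
        ← String.ofList_toList (s := PySem.Int.toStr (PySem.Int.mod num 4)), hc]
      exact String.ofList_append
    · rw [pvALoop, dif_neg hp, decimal_to_quartenary_alt, dif_neg hp]
      rfl

-- ===== VERDICT (by name: the statement is the Claim_ definition above) =====
theorem decimal_to_quartenary_spec : Claim_equal_decimal_to_quartenary := by
  intro num _ hpre
  exact pvMain num hpre
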